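-- pv_equiv track=rewrite | github.com/youkiti/i-1-grand-prix | src/interview_analysis/loader.py | build_sessions_data
-- ===== SOURCE A (Python) =====
-- from typing import Dict, List, Tuple, Iterator, Optional
-- from collections import defaultdict
--
-- MESSAGE_CANDIDATE_COLUMNS = ["message", "content", "text", "body"]
--
-- def pick_message_column(rows: List[Dict[str, str]]) -> str:
--     """メッセージ列を特定"""
--     if not rows:
--         raise ValueError("データが空です")
--
--     columns = rows[0].keys()
--     for col in MESSAGE_CANDIDATE_COLUMNS:
--         if col in columns:
--             return col
--     raise ValueError(f"メッセージ列が見つかりません。候補: {', '.join(MESSAGE_CANDIDATE_COLUMNS)}")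
--
-- def build_sessions_data(rows: List[Dict[str, str]]) -> Tuple[List[str], str, Dict[str, int]]:
--     """セッションごとにデータをグループ化"""
--     message_col = pick_message_column(rows)
--
--     # session_id でグループ化
--     sessions_dict = defaultdict(list)
--     for row in rows:
--         session_id = row.get("session_id", "")
--         sessions_dict[session_id].append(row)
--
--     sessions: List[str] = []
--     counts: Dict[str, int] = {}
--     parts: List[str] = []
--
--     for session_id, group in sessions_dict.items():
--         sessions.append(str(session_id))
--         counts[str(session_id)] = len(group)
--         lines = []
--
--         for row in group:
--             role = row.get("role", "")
--             role_prefix = f"{role}: " if role else ""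
--             content = str(row.get(message_col, ""))
--             lines.append(f"- {role_prefix}{content}")
--
--         parts.append(f"#{session_id}\n" + "\n".join(lines))
--
--     sessions_data = "\n\n".join(parts)
--     return sessions, sessions_data, counts
-- ===== SOURCE B (Python) =====
-- from typing import Dict, List, Tuple
--
-- MESSAGE_CANDIDATE_COLUMNS = ["message", "content", "text", "body"]
--
-- def pick_message_column(rows: List[Dict[str, str]]) -> str:
--     if not rows:
--         raise ValueError("データが空です")
--     columns = rows[0].keys()
--     for col in MESSAGE_CANDIDATE_COLUMNS:
--         if col in columns:
--             return col
--     raise ValueError(f"メッセージ列が見つかりません。候補: {', '.join(MESSAGE_CANDIDATE_COLUMNS)}")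
--
-- def build_sessions_data(rows: List[Dict[str, str]]) -> Tuple[List[str], str, Dict[str, int]]:
--     """Dict-free grouping by repeated stable partition: peel off the first remaining
--     session's rows by filtering, emit its block, and continue on the leftover rows."""
--     message_col = pick_message_column(rows)
--
--     sessions: List[str] = []
--     parts: List[str] = []
--     counts: Dict[str, int] = {}
--
--     rest = rows
--     while rest:
--         sid = str(rest[0].get("session_id", ""))
--         group = [r for r in rest if str(r.get("session_id", "")) == sid]
--         rest = [r for r in rest[1:] if str(r.get("session_id", "")) != sid]
--         sessions.append(sid)
--         counts[sid] = len(group)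
--         lines = ["- " + (f"{r.get('role', '')}: " if r.get("role", "") else "") + str(r.get(message_col, ""))
--                  for r in group]
--         parts.append(f"#{sid}\n" + "\n".join(lines))
--
--     return sessions, "\n\n".join(parts), counts
-- ===== Notes on version B (the rewrite author's own statement) =====
-- stated objective: alternative
-- what changed: Replaces A's dict-of-lists grouping plus a second pass over the buckets with a dict-free repeated-stable-partition loop: it peels off the first remaining session's rows by filtering the remainder list, emits that session's block immediately, and recurses on the leftover rows; first-seen order arises from the peeling order rather than from dict insertion order.
import Mathlib
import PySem

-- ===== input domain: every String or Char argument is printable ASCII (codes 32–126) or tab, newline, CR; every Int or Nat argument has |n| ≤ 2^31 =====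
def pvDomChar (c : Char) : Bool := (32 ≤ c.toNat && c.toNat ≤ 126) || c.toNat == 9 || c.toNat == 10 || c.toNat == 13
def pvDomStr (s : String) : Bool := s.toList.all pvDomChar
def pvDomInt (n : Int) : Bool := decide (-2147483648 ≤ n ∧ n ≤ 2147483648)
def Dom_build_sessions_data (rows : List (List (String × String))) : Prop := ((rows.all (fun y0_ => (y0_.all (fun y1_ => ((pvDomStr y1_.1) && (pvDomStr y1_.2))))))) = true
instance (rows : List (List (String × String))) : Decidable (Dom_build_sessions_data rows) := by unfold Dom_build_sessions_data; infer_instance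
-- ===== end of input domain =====

-- B replaces A's dict-of-lists grouping by dict-free repeated stable partition (peel one session at a
-- time by filtering); same results, O(n·k) instead of O(n) — objective: alternative, not faster.
-- Shared transliterations of the Python module's pieces (both Pythons contain them verbatim):
-- row.get(k, dflt) on a dict given as an association list (dict() keeps last value for a repeated key):
def pvRowGet (row : List (String × String)) (k dflt : String) : String :=
  (PySem.Dict.ofList row).getD k dflt

-- pick_message_column: first candidate column present in rows[0]; none = ValueError
def pick_message_column (rows : List (List (String × String))) : Option String :=
  match rows with
  | [] => none
  | r0 :: _ => ["message", "content", "text", "body"].find? (fun c => (PySem.Dict.ofList r0).keys.contains c)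

-- f"- {role_prefix}{content}" for one row
def pvLine (mcol : String) (row : List (String × String)) : String :=
  let role := pvRowGet row "role" ""
  let rp := if role ≠ "" then role ++ ": " else ""
  "- " ++ rp ++ pvRowGet row mcol ""

def pvSid (row : List (String × String)) : String := pvRowGet row "session_id" ""

-- ===== PORT A =====
def build_sessions_data (rows : List (List (String × String))) : List String × String × (List (String × Int)) :=
  match pick_message_column rows with
  | none => ([], "", [])   -- ValueError path, excluded by Pre_
  | some mcol =>
    -- sessions_dict = defaultdict(list); for row: sessions_dict[session_id].append(row)
    let sd : PySem.Dict String (List (List (String × String))) :=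
      rows.foldl (fun d row => d.modify (pvSid row) [] (· ++ [row])) PySem.Dict.empty
    -- for session_id, group in sessions_dict.items(): build sessions, counts, parts
    let st : List String × List (String × Int) × List String :=
      sd.items.foldl
        (fun acc p =>
          let lines := p.2.foldl (fun ls row => ls ++ [pvLine mcol row]) []
          (acc.1 ++ [p.1], acc.2.1 ++ [(p.1, (p.2.length : Int))],
           acc.2.2 ++ ["#" ++ p.1 ++ "\n" ++ PySem.Str.join "\n" lines]))
        ([], [], [])
    (st.1, PySem.Str.join "\n\n" st.2.2, st.2.1)

-- ===== PORT B =====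
-- the while loop of Source B: peel off the first remaining session's rows by filtering
def bloop (mcol : String) (rest : List (List (String × String)))
    (sessions parts : List String) (counts : List (String × Int)) :
    List String × List String × List (String × Int) :=
  match rest with
  | [] => (sessions, parts, counts)
  | r0 :: t =>
      bloop mcol (t.filter (fun r => !(pvSid r == pvSid r0)))
        (sessions ++ [pvSid r0])
        (parts ++ ["#" ++ pvSid r0 ++ "\n" ++ PySem.Str.join "\n"
                     (((r0 :: t).filter (fun r => pvSid r == pvSid r0)).map (pvLine mcol))])
        (counts ++ [(pvSid r0, ((((r0 :: t).filter (fun r => pvSid r == pvSid r0)).length : Int)))])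
termination_by rest.length
decreasing_by
  simp only [List.length_cons, List.length_unattach]
  exact Nat.lt_succ_of_le (le_trans (List.length_filter_le _ _) (by simp))

def build_sessions_data_alt (rows : List (List (String × String))) : List String × String × (List (String × Int)) :=
  match pick_message_column rows with
  | none => ([], "", [])   -- ValueError path, excluded by Pre_
  | some mcol =>
    let st := bloop mcol rows [] [] []
    (st.1, PySem.Str.join "\n\n" st.2.1, st.2.2)

-- ===== PRECONDITION & SPEC =====
-- Pre_ excludes exactly the ValueError inputs of pick_message_column: empty rows, or no candidate column in rows[0].
def Pre_build_sessions_data (rows : List (List (String × String))) : Prop :=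
  rows ≠ [] ∧ (["message", "content", "text", "body"].any (fun c => (rows.headD []).any (fun p => p.1 == c))) = true
instance (rows : List (List (String × String))) : Decidable (Pre_build_sessions_data rows) := by unfold Pre_build_sessions_data; infer_instance

def pvWitness_build_sessions_data : (List (List (String × String))) :=
  [[("message", "hi"), ("session_id", "s1")], [("message", "yo"), ("session_id", "s2"), ("role", "user")]]

def Spec_build_sessions_data (rows : List (List (String × String))) (out : List String × String × (List (String × Int))) : Prop := out = build_sessions_data_alt rows
instance (rows : List (List (String × String))) (out : List String × String × (List (String × Int))) : Decidable (Spec_build_sessions_data rows out) := by unfold Spec_build_sessions_data; infer_instance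

-- ===== CLAIM (what is proved, stated in full; the proofs are below) =====
def Claim_equal_build_sessions_data : Prop := ∀ (rows : List (List (String × String))), Dom_build_sessions_data rows → Pre_build_sessions_data rows → Spec_build_sessions_data rows (build_sessions_data rows)

-- ===== LEMMAS AND PROOFS =====

-- the common normal form both ports are reduced to
def nfK (rows : List (List (String × String))) : List String :=
  PySem.Set.ofList (rows.map pvSid)
def grp (rows : List (List (String × String))) (k : String) : List (List (String × String)) :=
  rows.filter (fun r => pvSid r == k)

-- first-occurrence dedup commutes with filter
theorem filter_ofList (p : String → Bool) (xs : List String) :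
    (PySem.Set.ofList xs).filter p = PySem.Set.ofList (xs.filter p) := by
  induction xs with
  | nil => rfl
  | cons x xs ih =>
    rw [PySem.Set.ofList_cons]
    show List.filter p (x :: List.filter (fun y => !(y == x)) (PySem.Set.ofList xs)) = _
    by_cases hp : p x = true
    · rw [List.filter_cons_of_pos hp, List.filter_filter,
          show (fun a => p a && !(a == x)) = (fun a => !(a == x) && p a) from
            funext fun a => Bool.and_comm _ _,
          ← List.filter_filter, ih, List.filter_cons_of_pos hp, PySem.Set.ofList_cons]
      rfl
    · have hp' : p x = false := by simpa using hp
      rw [List.filter_cons_of_neg (by simp [hp']), List.filter_filter,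
          show (fun a => p a && !(a == x)) = (fun a => !(a == x) && p a) from
            funext fun a => Bool.and_comm _ _,
          ← List.filter_filter, ih, List.filter_cons_of_neg (by simp [hp'])]
      apply List.filter_eq_self.mpr
      intro y hy
      have hpy := List.of_mem_filter ((PySem.Set.mem_ofList _ _).mp hy)
      simp only [Bool.not_eq_true', beq_eq_false_iff_ne]
      intro h; rw [h] at hpy; exact absurd hpy (by simp [hp'])

-- mapping the session id through a sid-keyed filter
theorem map_filter_sid (s : String) (t : List (List (String × String))) :
    (t.filter (fun r => !(pvSid r == s))).map pvSid = (t.map pvSid).filter (fun y => !(y == s)) := by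
  induction t with
  | nil => rfl
  | cons r t ih =>
    by_cases h : (pvSid r == s) = true
    · simp [h, ih]
    · simp [h, ih]

-- peeling the head key off a first-seen-order key list
theorem nfK_cons (r0 : List (String × String)) (t : List (List (String × String))) :
    nfK (r0 :: t) = pvSid r0 :: nfK (t.filter (fun r => !(pvSid r == pvSid r0))) := by
  unfold nfK
  rw [List.map_cons, PySem.Set.ofList_cons, map_filter_sid (pvSid r0) t, ← filter_ofList]
  rfl

-- members of nfK are sids of members
theorem mem_nfK {k : String} {rows : List (List (String × String))} (h : k ∈ nfK rows) :
    ∃ r ∈ rows, pvSid r = k := by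
  have := (PySem.Set.mem_ofList _ _).mp h
  obtain ⟨r, hr, rfl⟩ := List.mem_map.mp this
  exact ⟨r, hr, rfl⟩

-- groups of the other keys survive the peeling
theorem grp_peel {k : String} (r0 : List (String × String)) (t : List (List (String × String)))
    (hk : k ≠ pvSid r0) :
    grp (t.filter (fun r => !(pvSid r == pvSid r0))) k = grp (r0 :: t) k := by
  unfold grp
  rw [List.filter_filter, List.filter_cons_of_neg (by simp [Ne.symm hk])]
  apply List.filter_congr
  intro r _
  by_cases h : pvSid r == k
  · have : pvSid r = k := by simpa using h
    simp [this, hk]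
  · simp [h]

-- B's while loop computes the normal form behind its accumulators
theorem bloop_eq (mcol : String) : ∀ (n : ℕ) (rows : List (List (String × String))),
    rows.length = n → ∀ (s p : List String) (c : List (String × Int)),
    bloop mcol rows s p c =
      (s ++ nfK rows,
       p ++ (nfK rows).map (fun k => "#" ++ k ++ "\n" ++ PySem.Str.join "\n" ((grp rows k).map (pvLine mcol))),
       c ++ (nfK rows).map (fun k => (k, ((grp rows k).length : Int)))) := by
  intro n
  induction n using Nat.strong_induction_on with
  | _ n ih =>
    intro rows hlen s p c
    match rows with
    | [] => simp [bloop, nfK, grp]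
    | r0 :: t =>
      rw [bloop]
      have hlt : (t.filter (fun r => !(pvSid r == pvSid r0))).length < n := by
        have := List.length_filter_le (fun r => !(pvSid r == pvSid r0)) t
        simp only [List.length_cons] at hlen; omega
      rw [ih _ hlt _ rfl]
      rw [nfK_cons r0 t]
      have hmap : ∀ (β : Type) (f g : String → β),
          (∀ k ∈ nfK (t.filter (fun r => !(pvSid r == pvSid r0))), f k = g k) →
          (nfK (t.filter (fun r => !(pvSid r == pvSid r0)))).map f
            = (nfK (t.filter (fun r => !(pvSid r == pvSid r0)))).map g :=
        fun β f g h => List.map_congr_left h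
      have hne : ∀ k ∈ nfK (t.filter (fun r => !(pvSid r == pvSid r0))), k ≠ pvSid r0 := by
        intro k hk
        obtain ⟨r, hr, rfl⟩ := mem_nfK hk
        have := List.of_mem_filter hr
        simpa using this
      refine congrArg₂ Prod.mk ?_ (congrArg₂ Prod.mk ?_ ?_)
      · simp
      · rw [hmap _ _ (fun k => "#" ++ k ++ "\n" ++ PySem.Str.join "\n" ((grp (r0 :: t) k).map (pvLine mcol)))
              (fun k hk => by rw [grp_peel r0 t (hne k hk)])]
        simp [grp]
      · rw [hmap _ _ (fun k => (k, ((grp (r0 :: t) k).length : Int)))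
              (fun k hk => by rw [grp_peel r0 t (hne k hk)])]
        simp [grp]

-- A's triple-append fold over the grouped items is three maps
theorem tri_fold (mcol : String) (l : List (String × List (List (String × String))))
    (a : List String) (b : List (String × Int)) (c : List String) :
    l.foldl
        (fun acc p =>
          (acc.1 ++ [p.1], acc.2.1 ++ [(p.1, (p.2.length : Int))],
           acc.2.2 ++ ["#" ++ p.1 ++ "\n" ++ PySem.Str.join "\n" (p.2.foldl (fun ls row => ls ++ [pvLine mcol row]) [])]))
        (a, b, c)
    = (a ++ l.map (·.1), b ++ l.map (fun p => (p.1, (p.2.length : Int))),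
       c ++ l.map (fun p => "#" ++ p.1 ++ "\n" ++ PySem.Str.join "\n" (p.2.map (pvLine mcol)))) := by
  induction l generalizing a b c with
  | nil => simp
  | cons p t ih =>
    rw [List.foldl_cons, ih, PySem.List.foldl_append_singleton_eq_map]
    simp

-- A's grouping dict: keys are the first-seen sids, buckets are the filters
theorem sd_keys (rows : List (List (String × String))) :
    (rows.foldl (fun d row => d.modify (pvSid row) [] (· ++ [row])) PySem.Dict.empty).keys = nfK rows := by
  rw [PySem.Dict.keys_foldl_modify_key]
  simp [PySem.Set.update_nil_left, nfK]

theorem pair_filter (rows : List (List (String × String))) (k : String) :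
    List.map (fun x => x.2) (List.filter (fun p => p.1 == k) (rows.map (fun r => (pvSid r, r))))
      = grp rows k := by
  induction rows with
  | nil => rfl
  | cons r t ih =>
    by_cases h : (pvSid r == k) = true
    · simp [grp, h] at ih ⊢; exact ih
    · simp [grp, h] at ih ⊢; exact ih

theorem sd_getD (rows : List (List (String × String))) (k : String) :
    (rows.foldl (fun d row => d.modify (pvSid row) [] (· ++ [row])) PySem.Dict.empty).getD k [] = grp rows k := by
  have h : rows.foldl (fun d row => d.modify (pvSid row) [] (· ++ [row])) PySem.Dict.empty
      = (rows.map (fun r => (pvSid r, r))).foldl (fun d q => d.modify q.1 [] (· ++ [q.2])) PySem.Dict.empty := by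
    rw [List.foldl_map]
  rw [h, PySem.Dict.getD_foldl_modify_append, pair_filter]
  simp

-- ===== VERDICT (by name: the statement is the Claim_ definition above) =====
theorem build_sessions_data_spec : Claim_equal_build_sessions_data := by
  intro rows _ _
  unfold Spec_build_sessions_data
  cases h : pick_message_column rows with
  | none => simp [build_sessions_data, build_sessions_data_alt, h]
  | some mcol =>
    simp only [build_sessions_data, build_sessions_data_alt, h]
    rw [bloop_eq mcol rows.length rows rfl [] [] [], tri_fold]
    set sd := List.foldl (fun d row => d.modify (pvSid row) [] fun x => x ++ [row]) PySem.Dict.empty rows with hsd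
    have hnd : sd.keys.Nodup := by
      rw [hsd]; exact PySem.Dict.nodup_keys_foldl_modify_key _ _ _ _ _ (by simp)
    have hitems : sd.items = (nfK rows).map (fun k => (k, grp rows k)) := by
      rw [PySem.Dict.items_eq_map_keys sd hnd [], sd_keys]
      exact List.map_congr_left (fun k _ => by rw [sd_getD])
    rw [hitems]
    simp [List.map_map, Function.comp_def]
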